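-- pv_equiv track=rewrite | github.com/ChenglongChen/blog | tf-save-load/embedding.py | batch_text
-- ===== SOURCE A (Python) =====
-- def batch_text(corpus, batch_size, seq_length):
--     if seq_length >= len(corpus):
--         raise Error("seq_length >= len(corpus): %d>=%d" % (seq_length, len(corpus)))
--
--     seqs = [corpus[i:i+seq_length] for i in range(len(corpus) - seq_length)]
--     ys = [corpus[i:i+1] for i in range(seq_length, len(corpus))]
--     for i in range(0, len(seqs), batch_size):
--         x = seqs[i:i+batch_size]
--         y = ys[i:i+batch_size]
--
--         yield x, y
-- ===== SOURCE B (Python) =====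
-- def batch_text(corpus, batch_size, seq_length):
--     n = len(corpus)
--     if seq_length >= n:
--         raise ValueError("seq_length >= len(corpus): %d>=%d" % (seq_length, n))
--     m = n - seq_length
--     for start in range(0, m, batch_size):
--         stop = min(start + batch_size, m)
--         x = [corpus[j:j + seq_length] for j in range(start, stop)]
--         y = [corpus[seq_length + j:seq_length + j + 1] for j in range(start, stop)]
--         yield x, y
-- ===== Notes on version B (the rewrite author's own statement) =====
-- stated objective: simpler
-- what changed: B drops A's two precomputed whole-corpus lists (seqs/ys) and computes each batch's windows and labels directly from the corpus inside the single loop over batch-start offsets.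
import Mathlib
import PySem

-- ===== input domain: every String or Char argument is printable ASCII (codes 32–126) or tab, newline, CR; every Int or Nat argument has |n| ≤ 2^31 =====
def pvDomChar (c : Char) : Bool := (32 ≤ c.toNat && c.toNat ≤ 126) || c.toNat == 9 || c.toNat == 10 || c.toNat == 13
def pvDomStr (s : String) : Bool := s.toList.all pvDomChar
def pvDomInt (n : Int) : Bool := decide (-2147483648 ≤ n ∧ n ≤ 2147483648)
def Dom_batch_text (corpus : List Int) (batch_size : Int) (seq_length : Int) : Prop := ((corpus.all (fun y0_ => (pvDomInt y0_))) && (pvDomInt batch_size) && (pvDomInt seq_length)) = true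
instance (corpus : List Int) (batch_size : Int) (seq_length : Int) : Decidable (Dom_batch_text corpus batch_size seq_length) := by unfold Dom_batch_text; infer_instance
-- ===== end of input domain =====

-- B drops A's precomputed seqs/ys lists and builds each batch directly from the corpus
-- per batch-start offset (objective: simpler, same asymptotic cost; return-value equivalence
-- of the fully-materialised generators).

-- ===== PORT A =====
def batch_text (corpus : List Int) (batch_size : Int) (seq_length : Int) : List (List (List Int) × List (List Int)) :=
  let n : Int := corpus.length
  let seqs : List (List Int) :=
    (PySem.List.pyRange 0 (n - seq_length) 1).map
      (fun i => PySem.List.slice corpus (some i) (some (i + seq_length)))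
  let ys : List (List Int) :=
    (PySem.List.pyRange seq_length n 1).map
      (fun i => PySem.List.slice corpus (some i) (some (i + 1)))
  (PySem.List.pyRange 0 (seqs.length : Int) batch_size).foldl
    (fun acc i =>
      let x := PySem.List.slice seqs (some i) (some (i + batch_size))
      let y := PySem.List.slice ys (some i) (some (i + batch_size))
      acc ++ [(x, y)]) []

-- ===== PORT B =====
def batch_text_alt (corpus : List Int) (batch_size : Int) (seq_length : Int) : List (List (List Int) × List (List Int)) :=
  let n : Int := corpus.length
  let m : Int := n - seq_length
  (PySem.List.pyRange 0 m batch_size).foldl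
    (fun acc start =>
      let stop : Int := min (start + batch_size) m
      let x := (PySem.List.pyRange start stop 1).map
        (fun j => PySem.List.slice corpus (some j) (some (j + seq_length)))
      let y := (PySem.List.pyRange start stop 1).map
        (fun j => PySem.List.slice corpus (some (seq_length + j)) (some (seq_length + j + 1)))
      acc ++ [(x, y)]) []

-- ===== PRECONDITION & SPEC =====
-- A raises whenever seq_length ≥ len(corpus) (NameError: undefined 'Error') and whenever
-- batch_size = 0 (ValueError from range); Pre_ excludes exactly those inputs.
def Pre_batch_text (corpus : List Int) (batch_size : Int) (seq_length : Int) : Prop :=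
  seq_length < (corpus.length : Int) ∧ batch_size ≠ 0
instance (corpus : List Int) (batch_size : Int) (seq_length : Int) : Decidable (Pre_batch_text corpus batch_size seq_length) := by unfold Pre_batch_text; infer_instance

def pvWitness_batch_text : List Int × Int × Int := ([1, 2, 3, 4, 5], 2, 2)

def Spec_batch_text (corpus : List Int) (batch_size : Int) (seq_length : Int) (out : List (List (List Int) × List (List Int))) : Prop := out = batch_text_alt corpus batch_size seq_length
instance (corpus : List Int) (batch_size : Int) (seq_length : Int) (out : List (List (List Int) × List (List Int))) : Decidable (Spec_batch_text corpus batch_size seq_length out) := by unfold Spec_batch_text; infer_instance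

-- ===== CLAIM (what is proved, stated in full; the proofs are below) =====
def Claim_equal_batch_text : Prop := ∀ (corpus : List Int) (batch_size : Int) (seq_length : Int), Dom_batch_text corpus batch_size seq_length → Pre_batch_text corpus batch_size seq_length → Spec_batch_text corpus batch_size seq_length (batch_text corpus batch_size seq_length)

-- ===== LEMMAS AND PROOFS =====

theorem pv_drop_pyRange (k : Nat) : ∀ (a b : Int),
    (PySem.List.pyRange a b 1).drop k = PySem.List.pyRange (a + k) b 1 := by
  induction k with
  | zero => intro a b; simp
  | succ k ih =>
    intro a b
    by_cases h : a < b
    · rw [PySem.List.pyRange_one_cons h, List.drop_succ_cons, ih (a + 1) b]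
      congr 1
      push_cast
      ring
    · rw [PySem.List.pyRange_one_eq_nil (by omega), PySem.List.pyRange_one_eq_nil (by omega)]
      simp

theorem pv_take_pyRange (k : Nat) : ∀ (a b : Int),
    (PySem.List.pyRange a b 1).take k = PySem.List.pyRange a (min (a + k) b) 1 := by
  induction k with
  | zero =>
    intro a b
    rw [List.take_zero]
    exact (PySem.List.pyRange_one_eq_nil (by omega)).symm
  | succ k ih =>
    intro a b
    by_cases h : a < b
    · rw [PySem.List.pyRange_one_cons h, List.take_succ_cons, ih (a + 1) b]
      have hmin : min (a + 1 + (k : Int)) b = min (a + ((k + 1 : Nat) : Int)) b := by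
        push_cast; omega
      rw [hmin, ← PySem.List.pyRange_one_cons
        (show a < min (a + ((k + 1 : Nat) : Int)) b by push_cast; omega)]
    · rw [PySem.List.pyRange_one_eq_nil (by omega), List.take_nil]
      exact (PySem.List.pyRange_one_eq_nil (by push_cast; omega)).symm

-- slice of a comprehension over a range is the comprehension over the sub-range
theorem pv_slice_map_pyRange {α : Type} (f : Int → α) (a m i bs : Int)
    (hi : 0 ≤ i) (hbs : 0 < bs) :
    PySem.List.slice ((PySem.List.pyRange a m 1).map f) (some i) (some (i + bs))
      = (PySem.List.pyRange (a + i) (min (a + i + bs) m) 1).map f := by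
  rw [PySem.List.slice_toNat _ hi (show (0:Int) ≤ i + bs by omega), ← List.map_drop, ← List.map_take,
    pv_drop_pyRange, pv_take_pyRange]
  congr 2
  · omega
  · omega

theorem pv_pyRange_shift {α : Type} (g : Int → α) (d a b : Int) :
    (PySem.List.pyRange (d + a) (d + b) 1).map g
      = (PySem.List.pyRange a b 1).map (fun j => g (d + j)) := by
  rw [PySem.List.pyRange_one, PySem.List.pyRange_one, List.map_map, List.map_map]
  have h : (d + b - (d + a)).toNat = (b - a).toNat := by omega
  rw [h]
  apply List.map_congr_left
  intro k _
  simp only [Function.comp_apply]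
  congr 1
  ring

theorem batch_text_spec : Claim_equal_batch_text := by
  intro corpus bs L _ hpre
  obtain ⟨hLn, hbs⟩ := hpre
  unfold Spec_batch_text
  simp only [batch_text, batch_text_alt, List.length_map, PySem.List.length_pyRange_one]
  have hm : (0:Int) < (corpus.length : Int) - L := by omega
  have hcast : ((((corpus.length : Int) - L - 0).toNat : Int)) = (corpus.length : Int) - L := by
    omega
  rw [hcast]
  rcases lt_or_gt_of_ne hbs with hneg | hpos
  · rw [show PySem.List.pyRange 0 ((corpus.length : Int) - L) bs = [] from by
      simp [PySem.List.pyRange, hneg.ne, not_lt_of_gt hneg, not_lt.mpr hm.le]]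
    simp
  · rw [PySem.List.foldl_append_singleton_eq_map, PySem.List.foldl_append_singleton_eq_map,
      List.nil_append, List.nil_append]
    apply List.map_congr_left
    intro i hi
    obtain ⟨hi0, him, -⟩ := (PySem.List.mem_pyRange_iff_of_pos hpos i).1 hi
    refine Prod.ext ?_ ?_
    · -- x batch
      rw [pv_slice_map_pyRange _ 0 _ i bs hi0 hpos]
      simp only [zero_add]
    · -- y batch
      rw [pv_slice_map_pyRange _ L _ i bs hi0 hpos]
      have hmin : min (L + i + bs) ((corpus.length : Int))
          = L + min (i + bs) ((corpus.length : Int) - L) := by omega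
      rw [hmin, pv_pyRange_shift]

-- ===== VERDICT (by name: the statement is the Claim_ definition above) =====
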